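-- pv_equiv track=rewrite | github.com/nastyh/LeetCode | Basic Data Structures/1679_Max_Number_of_K_Sum_Pairs.py | maxOperations_dict
-- ===== SOURCE A (Python) =====
-- from collections import defaultdict
--
-- def maxOperations_dict(nums, k):  # O(n) both
-- 	dic = defaultdict(int)
-- 	count = 0
-- 	for n in nums:
-- 		if k - n in dic and dic[k - n] > 0:
-- 			dic[k - n] -= 1
-- 			count += 1
-- 		else:
-- 			dic[n] += 1
-- 	return count
-- ===== SOURCE B (Python) =====
-- def maxOperations_dict(nums, k):
--     # Count occurrences once, then sum min(cnt[v], cnt[k-v]) over each value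
--     # group (handled at the smaller endpoint), plus cnt[k//2]//2 for the
--     # self-paired middle value when v == k - v.
--     cnt = {}
--     for n in nums:
--         cnt[n] = cnt.get(n, 0) + 1
--     total = 0
--     for v, c in cnt.items():
--         w = k - v
--         if v < w:
--             total += min(c, cnt.get(w, 0))
--         elif v == w:
--             total += c // 2
--     return total
-- ===== Notes on version B (the rewrite author's own statement) =====
-- stated objective: alternative
-- what changed: Replaces the online greedy pairing (a dict of unmatched elements mutated per element) by a closed-form count: build a frequency counter once, then sum min(cnt[v], cnt[k-v]) per value group plus cnt[k/2]//2 for the self-paired middle value.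
import Mathlib
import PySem

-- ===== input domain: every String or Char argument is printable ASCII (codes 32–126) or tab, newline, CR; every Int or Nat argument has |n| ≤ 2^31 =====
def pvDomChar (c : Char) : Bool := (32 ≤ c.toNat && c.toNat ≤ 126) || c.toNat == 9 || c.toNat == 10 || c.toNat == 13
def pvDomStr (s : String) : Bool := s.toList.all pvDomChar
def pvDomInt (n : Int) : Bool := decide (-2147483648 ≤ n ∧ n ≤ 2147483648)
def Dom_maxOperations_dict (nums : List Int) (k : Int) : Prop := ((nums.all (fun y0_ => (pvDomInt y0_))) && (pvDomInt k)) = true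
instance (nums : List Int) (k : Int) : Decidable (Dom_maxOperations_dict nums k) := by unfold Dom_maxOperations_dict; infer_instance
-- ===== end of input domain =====

-- B replaces A's online greedy pairing with a one-pass frequency counter plus a
-- closed-form per-value-group sum (alternative algorithm, same O(n) cost).


-- ===== PORT A =====
-- one loop step of A: match the element against an unmatched complement, else store it
def stepA (k : Int) (st : PySem.Dict Int Int × Int) (n : Int) : PySem.Dict Int Int × Int :=
  if st.1.contains (k - n) && decide (st.1.getD (k - n) 0 > 0) then
    (st.1.modify (k - n) 0 (· - 1), st.2 + 1)
  else
    (st.1.modify n 0 (· + 1), st.2)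

def maxOperations_dict (nums : List Int) (k : Int) : Int :=
  (nums.foldl (stepA k) (PySem.Dict.empty, 0)).2

-- ===== PORT B =====
def maxOperations_dict_alt (nums : List Int) (k : Int) : Int :=
  let cnt := nums.foldl (fun d n => d.insert n (d.getD n 0 + 1)) PySem.Dict.empty
  cnt.items.foldl (fun total vc =>
    let w := k - vc.1
    if vc.1 < w then total + min vc.2 (cnt.getD w 0)
    else if vc.1 = w then total + PySem.Int.floordiv vc.2 2
    else total) 0

-- ===== PRECONDITION & SPEC =====
def Spec_maxOperations_dict (nums : List Int) (k : Int) (out : Int) : Prop := out = maxOperations_dict_alt nums k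
instance (nums : List Int) (k : Int) (out : Int) : Decidable (Spec_maxOperations_dict nums k out) := by unfold Spec_maxOperations_dict; infer_instance

-- ===== CLAIM (what is proved, stated in full; the proofs are below) =====
def Claim_equal_maxOperations_dict : Prop := ∀ (nums : List Int) (k : Int), Dom_maxOperations_dict nums k → Spec_maxOperations_dict nums k (maxOperations_dict nums k)

-- ===== LEMMAS AND PROOFS =====

-- count of v in p, as an Int
def cI (p : List Int) (v : Int) : Int := (p.count v : Int)

-- the per-value contribution of v to the maximal number of k-sum pairs of p
def gF (k : Int) (p : List Int) (v : Int) : Int :=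
  if 2 * v = k then (cI p v) / 2
  else if v < k - v then min (cI p v) (cI p (k - v))
  else 0

-- the maximal number of k-sum pairs of p
def GF (k : Int) (p : List Int) : Int := ∑ v ∈ p.toFinset, gF k p v

-- the number of unmatched occurrences of v after A has processed p
def leftover (k : Int) (p : List Int) (v : Int) : Int :=
  if 2 * v = k then (cI p v) % 2
  else max (cI p v - cI p (k - v)) 0

theorem cI_nonneg (p : List Int) (v : Int) : 0 ≤ cI p v := by
  simp [cI]

theorem cI_append (p : List Int) (n v : Int) :
    cI (p ++ [n]) v = cI p v + (if v = n then 1 else 0) := by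
  simp [cI, List.count_append, List.count_singleton]
  split_ifs with h <;> simp <;> omega

theorem cI_not_mem (p : List Int) (v : Int) (h : v ∉ p) : cI p v = 0 := by
  simp [cI, List.count_eq_zero_of_not_mem h]

theorem gF_not_mem (k : Int) (p : List Int) (v : Int) (h : v ∉ p) : gF k p v = 0 := by
  have h0 := cI_not_mem p v h
  have h1 := cI_nonneg p (k - v)
  unfold gF
  split_ifs <;> omega

-- GF over any finset containing the support
theorem GF_eq_sum (k : Int) (p : List Int) (S : Finset Int) (hS : p.toFinset ⊆ S) :
    GF k p = ∑ v ∈ S, gF k p v := by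
  unfold GF
  refine Finset.sum_subset (f := gF k p) hS ?_
  intro v _ hv
  exact gF_not_mem k p v (by simpa using hv)

-- the G-step: appending n raises GF by 1 exactly when an unmatched complement exists
theorem GF_step (k : Int) (p : List Int) (n : Int) :
    GF k (p ++ [n]) = GF k p + (if leftover k p (k - n) > 0 then 1 else 0) := by
  classical
  set S : Finset Int := insert n (insert (k - n) p.toFinset) with hS
  have hsub1 : p.toFinset ⊆ S := by
    intro v hv; simp [hS]
    exact Or.inr (Or.inr (List.mem_toFinset.mp hv))
  have hsub2 : (p ++ [n]).toFinset ⊆ S := by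
    intro v hv
    simp [List.toFinset_append] at hv
    simp [hS]; tauto
  rw [GF_eq_sum k p S hsub1, GF_eq_sum k (p ++ [n]) S hsub2]
  have hmemn : n ∈ S := by simp [hS]
  by_cases h2 : 2 * n = k
  · -- self-pair value: k - n = n
    have hkn : k - n = n := by omega
    rw [hkn]
    -- split off the n-term on both sides
    rw [← Finset.add_sum_erase S _ hmemn, ← Finset.add_sum_erase S (gF k p) hmemn]
    have hrest : ∑ v ∈ S.erase n, gF k (p ++ [n]) v = ∑ v ∈ S.erase n, gF k p v := by
      apply Finset.sum_congr rfl
      intro v hv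
      have hvn : v ≠ n := Finset.ne_of_mem_erase hv
      have hkv : ¬ (k - v = n) := by omega
      unfold gF
      rw [cI_append, cI_append, if_neg hvn, if_neg hkv]
      split_ifs <;> omega
    rw [hrest]
    unfold gF leftover
    rw [cI_append, if_pos rfl, hkn]
    split_ifs <;> omega
  · -- ordinary pair: n ≠ k - n
    have hne : k - n ≠ n := by omega
    have hmemkn : k - n ∈ S.erase n := by simp [hS, hne]
    rw [← Finset.add_sum_erase S _ hmemn, ← Finset.add_sum_erase S (gF k p) hmemn,
        ← Finset.add_sum_erase _ _ hmemkn, ← Finset.add_sum_erase _ (gF k p) hmemkn]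
    have hrest : ∑ v ∈ (S.erase n).erase (k - n), gF k (p ++ [n]) v
        = ∑ v ∈ (S.erase n).erase (k - n), gF k p v := by
      apply Finset.sum_congr rfl
      intro v hv
      have hvkn : v ≠ k - n := Finset.ne_of_mem_erase hv
      have hvn : v ≠ n := Finset.ne_of_mem_erase (Finset.mem_of_mem_erase hv)
      have hkv : ¬ (k - v = n) := by omega
      unfold gF
      rw [cI_append, cI_append, if_neg hvn, if_neg hkv]
      split_ifs <;> omega
    rw [hrest]
    have hr : k - (k - n) = n := by ring
    have h2' : ¬ (2 * (k - n) = k) := by omega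
    simp only [gF, leftover, cI_append, hr]
    generalize (∑ v ∈ (S.erase n).erase (k - n),
      (if 2 * v = k then cI p v / 2 else if v < k - v then min (cI p v) (cI p (k - v)) else 0)) = T
    split_ifs <;> omega

-- the leftover update under one step of A
theorem leftover_step (k : Int) (p : List Int) (n v : Int) :
    leftover k (p ++ [n]) v =
      if leftover k p (k - n) > 0 then
        leftover k p v - (if v = k - n then 1 else 0)
      else
        leftover k p v + (if v = n then 1 else 0) := by
  by_cases hv1 : v = n
  · by_cases hv2 : v = k - n
    · -- v = n = k - n, the self-pair value
      rw [hv1]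
      have hkn : k - n = n := by omega
      simp only [leftover, cI_append, hkn]
      split_ifs <;> omega
    · -- v = n, n is not its own complement
      rw [hv1]
      have hkn : ¬ (k - n = n) := by omega
      have h2 : ¬ (2 * n = k) := by omega
      have hr : k - (k - n) = n := by ring
      simp only [leftover, cI_append, hr, if_neg hkn, if_neg h2]
      split_ifs <;> omega
  · by_cases hv2 : v = k - n
    · -- v = k - n ≠ n
      rw [hv2]
      have h2 : ¬ (2 * (k - n) = k) := by omega
      have hr : k - (k - n) = n := by ring
      have hkn : ¬ (k - n = n) := by omega
      simp only [leftover, cI_append, hr, if_neg hkn, if_neg h2]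
      split_ifs <;> omega
    · -- v untouched: neither v nor k - v is n
      have hkv : ¬ (k - v = n) := by omega
      simp only [leftover, cI_append, if_neg hv1, if_neg hkv]
      split_ifs <;> omega

-- A's condition is equivalent to leftover > 0 under the invariant
theorem condA_iff (k n : Int) (dic : PySem.Dict Int Int) (p : List Int)
    (hinv : ∀ v, dic.getD v 0 = leftover k p v) :
    (dic.contains (k - n) && decide (dic.getD (k - n) 0 > 0)) = decide (leftover k p (k - n) > 0) := by
  rw [← hinv (k - n)]
  cases hc : dic.contains (k - n) with
  | false =>
    have h0 : dic.getD (k - n) 0 = 0 := PySem.Dict.getD_of_not_contains dic 0 hc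
    simp [h0]
  | true => simp

-- main loop invariant for A
theorem loopA_eq (k : Int) (r : List Int) : ∀ (p : List Int) (dic : PySem.Dict Int Int) (count : Int),
    (∀ v, dic.getD v 0 = leftover k p v) →
    (r.foldl (stepA k) (dic, count)).2 = count + GF k (p ++ r) - GF k p := by
  induction r with
  | nil => intro p dic count _; simp
  | cons n r ih =>
    intro p dic count hinv
    rw [List.foldl_cons]
    have hcond := condA_iff k n dic p hinv
    have hassoc : p ++ n :: r = (p ++ [n]) ++ r := by simp
    by_cases hl : leftover k p (k - n) > 0
    · have hstep : stepA k (dic, count) n = (dic.modify (k - n) 0 (· - 1), count + 1) := by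
        unfold stepA; rw [hcond]; simp [hl]
      rw [hstep]
      have hinv' : ∀ v, (dic.modify (k - n) 0 (· - 1)).getD v 0 = leftover k (p ++ [n]) v := by
        intro v
        rw [PySem.Dict.getD_modify, leftover_step, if_pos hl, ← hinv v]
        split_ifs with h
        · rw [h]
        · ring
      rw [ih (p ++ [n]) _ (count + 1) hinv', hassoc, GF_step k p n, if_pos hl]
      omega
    · have hstep : stepA k (dic, count) n = (dic.modify n 0 (· + 1), count) := by
        unfold stepA; rw [hcond]; simp [hl]
      rw [hstep]
      have hinv' : ∀ v, (dic.modify n 0 (· + 1)).getD v 0 = leftover k (p ++ [n]) v := by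
        intro v
        rw [PySem.Dict.getD_modify, leftover_step, if_neg hl, ← hinv v]
        split_ifs with h
        · rw [h]
        · ring
      rw [ih (p ++ [n]) _ count hinv', hassoc, GF_step k p n, if_neg hl]
      omega

-- the fold in B sums its per-item term
theorem foldB (k : Int) (cnt : PySem.Dict Int Int) (l : List (Int × Int)) : ∀ acc : Int,
    l.foldl (fun total vc =>
      let w := k - vc.1
      if vc.1 < w then total + min vc.2 (cnt.getD w 0)
      else if vc.1 = w then total + PySem.Int.floordiv vc.2 2
      else total) acc
    = acc + (l.map (fun vc =>
        if vc.1 < k - vc.1 then min vc.2 (cnt.getD (k - vc.1) 0)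
        else if vc.1 = k - vc.1 then PySem.Int.floordiv vc.2 2
        else 0)).sum := by
  induction l with
  | nil => intro acc; simp
  | cons x t ih =>
    intro acc
    rw [List.foldl_cons, ih, List.map_cons, List.sum_cons]
    dsimp only
    split_ifs <;> ring

-- B computes GF
theorem altB_eq (nums : List Int) (k : Int) : maxOperations_dict_alt nums k = GF k nums := by
  unfold maxOperations_dict_alt
  simp only [PySem.Dict.foldl_insert_getD_add_one_eq_counter]
  rw [PySem.Dict.items_counter, foldB, List.map_map]
  have hterm : ∀ v : Int,
      ((fun vc : Int × Int =>
        if vc.1 < k - vc.1 then min vc.2 ((PySem.Dict.counter nums).getD (k - vc.1) 0)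
        else if vc.1 = k - vc.1 then PySem.Int.floordiv vc.2 2
        else 0) ∘ (fun v => (v, (nums.count v : Int)))) v = gF k nums v := by
    intro v
    simp only [Function.comp_apply, PySem.Dict.getD_counter, gF, cI]
    have h2 : (0:Int) < 2 := by omega
    rw [PySem.Int.floordiv_eq_ediv_of_pos h2]
    split_ifs <;> first | rfl | omega
  rw [List.map_congr_left (fun v _ => hterm v)]
  rw [zero_add]
  have hnd : (PySem.Set.ofList nums).Nodup := PySem.Set.nodup_ofList nums
  rw [← List.sum_toFinset _ hnd]
  unfold GF
  apply Finset.sum_congr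
  · ext v; simp [List.mem_toFinset, PySem.Set.mem_ofList]
  · intros; rfl

-- ===== VERDICT (by name: the statement is the Claim_ definition above) =====
theorem maxOperations_dict_spec : Claim_equal_maxOperations_dict := by
  intro nums k _
  unfold Spec_maxOperations_dict
  have hA : maxOperations_dict nums k = GF k nums := by
    have h := loopA_eq k nums [] PySem.Dict.empty 0 (by
      intro v; simp [leftover, cI, PySem.Dict.getD_empty])
    simpa [maxOperations_dict, GF] using h
  rw [hA, altB_eq]
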